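-- pv_equiv track=rewrite | github.com/AnthonyCheetham/advent_of_code2022 | day23.py | get_moveable_elves
-- ===== SOURCE A (Python) =====
-- def get_moveable_elves(elves):
--     elves_set = set(elves)
--     moveable = [False for e in elves]
--     for ix,e in enumerate(elves):
--         for pos in [(-1,-1),(-1,0),(-1,1),(0,-1),(0,1),(1,-1),(1,0),(1,1)]:
--             if (e[0]+pos[0],e[1]+pos[1]) in elves_set:
--                 moveable[ix] = True
--                 continue
--     return moveable
-- ===== SOURCE B (Python) =====
-- def get_moveable_elves(elves):
--     neighbor_cells = set()
--     for (x, y) in elves: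
--         for (dx, dy) in [(-1,-1),(-1,0),(-1,1),(0,-1),(0,1),(1,-1),(1,0),(1,1)]:
--             neighbor_cells.add((x + dx, y + dy))
--     return [e in neighbor_cells for e in elves]
-- ===== Notes on version B (the rewrite author's own statement) =====
-- stated objective: alternative
-- what changed: Instead of testing the 8 neighbours of each elf against the elf set, B builds once the union of all neighbour cells of every elf and answers each elf by a single membership test, relying on the symmetry of the offset set.
import Mathlib
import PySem

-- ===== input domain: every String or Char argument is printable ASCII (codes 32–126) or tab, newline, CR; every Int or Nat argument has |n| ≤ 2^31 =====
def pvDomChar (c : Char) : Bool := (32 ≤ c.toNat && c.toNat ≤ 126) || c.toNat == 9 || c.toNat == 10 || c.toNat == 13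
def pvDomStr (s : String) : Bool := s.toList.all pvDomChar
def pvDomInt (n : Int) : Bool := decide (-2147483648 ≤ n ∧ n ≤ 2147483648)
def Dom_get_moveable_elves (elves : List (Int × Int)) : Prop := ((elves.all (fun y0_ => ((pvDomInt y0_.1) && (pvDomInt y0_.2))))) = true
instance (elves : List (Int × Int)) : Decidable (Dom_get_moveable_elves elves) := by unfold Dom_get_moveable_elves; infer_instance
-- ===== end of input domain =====

-- B replaces the per-elf scan of the 8 neighbour offsets against the elf set by one pass
-- building the union of all neighbour cells, then a single membership test per elf
-- (exact by symmetry of the offset set); alternative decomposition, same cost.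

-- the 8-offset literal both Pythons spell out
def pvOffsets : List (Int × Int) := [(-1,-1),(-1,0),(-1,1),(0,-1),(0,1),(1,-1),(1,0),(1,1)]

-- ===== PORT A =====
def get_moveable_elves (elves : List (Int × Int)) : List Bool :=
  let elves_set : PySem.Set (Int × Int) := PySem.Set.ofList elves
  let moveable : List Bool := elves.map (fun _ => false)
  (PySem.List.enumerate elves).foldl
    (fun mv ie =>
      pvOffsets.foldl
        (fun mv pos =>
          if PySem.Set.contains elves_set (ie.2.1 + pos.1, ie.2.2 + pos.2) then
            PySem.List.pySetD mv ie.1 true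
          else mv)
        mv)
    moveable

-- ===== PORT B =====
def get_moveable_elves_alt (elves : List (Int × Int)) : List Bool :=
  let neighbor_cells : PySem.Set (Int × Int) :=
    elves.foldl
      (fun s e =>
        pvOffsets.foldl (fun s d => PySem.Set.add s (e.1 + d.1, e.2 + d.2)) s)
      PySem.Set.empty
  elves.map (fun e => PySem.Set.contains neighbor_cells e)

-- ===== PRECONDITION & SPEC =====
def Spec_get_moveable_elves (elves : List (Int × Int)) (out : List Bool) : Prop := out = get_moveable_elves_alt elves
instance (elves : List (Int × Int)) (out : List Bool) : Decidable (Spec_get_moveable_elves elves out) := by unfold Spec_get_moveable_elves; infer_instance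

-- ===== CLAIM (what is proved, stated in full; the proofs are below) =====
def Claim_equal_get_moveable_elves : Prop := ∀ (elves : List (Int × Int)), Dom_get_moveable_elves elves → Spec_get_moveable_elves elves (get_moveable_elves elves)

-- ===== LEMMAS AND PROOFS =====

-- A's inner offset loop: repeatedly (idempotently) setting index n to true is one conditional set
lemma innerA_fold (c : (Int × Int) → Bool) (n : Nat) :
    ∀ (l : List (Int × Int)) (mv : List Bool),
      l.foldl (fun mv pos => if c pos then PySem.List.pySetD mv (n : Int) true else mv) mv
        = if l.any c then mv.set n true else mv := by
  intro l
  induction l with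
  | nil => simp
  | cons hd tl ih =>
    intro mv
    simp only [List.foldl_cons, List.any_cons]
    by_cases h : c hd = true
    · rw [if_pos h, ih]
      simp [h, PySem.List.pySetD_natCast, List.set_set]
    · have h' : c hd = false := by revert h; cases c hd <;> simp
      rw [if_neg h, ih]
      simp only [h', Bool.false_or]

-- A's outer loop fills the all-false suffix elementwise with the per-elf condition
lemma outerA_fold (es : PySem.Set (Int × Int)) :
    ∀ (rest : List (Int × Int)) (pre : List Bool),
      (PySem.List.enumerate rest ((pre.length : Nat) : Int)).foldl
        (fun mv ie =>
          pvOffsets.foldl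
            (fun mv pos =>
              if PySem.Set.contains es (ie.2.1 + pos.1, ie.2.2 + pos.2) then
                PySem.List.pySetD mv ie.1 true
              else mv)
            mv)
        (pre ++ rest.map (fun _ => false))
      = pre ++ rest.map (fun e =>
          pvOffsets.any (fun pos => PySem.Set.contains es (e.1 + pos.1, e.2 + pos.2))) := by
  intro rest
  induction rest with
  | nil => intro pre; simp
  | cons e tl ih =>
    intro pre
    simp only [PySem.List.enumerate_cons, List.foldl_cons, List.map_cons]
    rw [innerA_fold]
    by_cases h2 : (pvOffsets.any fun pos => PySem.Set.contains es (e.1 + pos.1, e.2 + pos.2)) = true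
    · rw [if_pos h2, h2]
      have hset : (pre ++ false :: List.map (fun (_ : Int × Int) => false) tl).set pre.length true
          = (pre ++ [true]) ++ List.map (fun (_ : Int × Int) => false) tl := by simp
      rw [hset]
      have hc : ((pre.length : Nat) : Int) + 1 = (((pre ++ [true]).length : Nat) : Int) := by simp
      rw [hc, ih (pre ++ [true])]
      simp
    · have h2' : (pvOffsets.any fun pos => PySem.Set.contains es (e.1 + pos.1, e.2 + pos.2)) = false := by
        revert h2; cases (pvOffsets.any fun pos => PySem.Set.contains es (e.1 + pos.1, e.2 + pos.2)) <;> simp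
      rw [if_neg h2, h2']
      have hinit : pre ++ false :: List.map (fun (_ : Int × Int) => false) tl
          = (pre ++ [false]) ++ List.map (fun (_ : Int × Int) => false) tl := by simp
      rw [hinit]
      have hc : ((pre.length : Nat) : Int) + 1 = (((pre ++ [false]).length : Nat) : Int) := by simp
      rw [hc, ih (pre ++ [false])]
      simp

-- membership in B's two-level fold of Set.add over all elves and offsets
lemma mem_nbfold :
    ∀ (l : List (Int × Int)) (s : PySem.Set (Int × Int)) (p : Int × Int),
      p ∈ l.foldl
          (fun s e => pvOffsets.foldl (fun s d => PySem.Set.add s (e.1 + d.1, e.2 + d.2)) s)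
          s
        ↔ p ∈ s ∨ ∃ e ∈ l, ∃ d ∈ pvOffsets, p = (e.1 + d.1, e.2 + d.2) := by
  have inner : ∀ (e : Int × Int) (l : List (Int × Int)) (s : PySem.Set (Int × Int)) (p : Int × Int),
      p ∈ l.foldl (fun s d => PySem.Set.add s (e.1 + d.1, e.2 + d.2)) s
        ↔ p ∈ s ∨ ∃ d ∈ l, p = (e.1 + d.1, e.2 + d.2) := by
    intro e l
    induction l with
    | nil => simp
    | cons hd tl ih =>
      intro s p
      simp only [List.foldl_cons, ih, PySem.Set.mem_add, List.mem_cons]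
      constructor
      · rintro (⟨h | h⟩ | ⟨d, hd', rfl⟩)
        · exact Or.inl h
        · exact Or.inr ⟨hd, Or.inl rfl, h⟩
        · exact Or.inr ⟨d, Or.inr hd', rfl⟩
      · rintro (h | ⟨d, hd' | hd', rfl⟩)
        · exact Or.inl (Or.inl h)
        · subst hd'; exact Or.inl (Or.inr rfl)
        · exact Or.inr ⟨d, hd', rfl⟩
  intro l
  induction l with
  | nil => simp
  | cons hd tl ih =>
    intro s p
    simp only [List.foldl_cons, ih, inner, List.mem_cons]
    constructor
    · rintro (⟨h | ⟨d, hd', rfl⟩⟩ | ⟨e, he, d, hd', rfl⟩)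
      · exact Or.inl h
      · exact Or.inr ⟨hd, Or.inl rfl, d, hd', rfl⟩
      · exact Or.inr ⟨e, Or.inr he, d, hd', rfl⟩
    · rintro (h | ⟨e, he | he, d, hd', rfl⟩)
      · exact Or.inl (Or.inl h)
      · subst he; exact Or.inl (Or.inr ⟨d, hd', rfl⟩)
      · exact Or.inr ⟨e, he, d, hd', rfl⟩

-- the offset set is symmetric
lemma neg_mem_offsets {d : Int × Int} (h : d ∈ pvOffsets) : (-d.1, -d.2) ∈ pvOffsets := by
  fin_cases h <;> decide

-- pointwise agreement of the two per-elf conditions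
lemma cond_eq (elves : List (Int × Int)) (e : Int × Int) :
    pvOffsets.any (fun pos => PySem.Set.contains (PySem.Set.ofList elves) (e.1 + pos.1, e.2 + pos.2))
      = PySem.Set.contains
          (elves.foldl
            (fun s e' => pvOffsets.foldl (fun s d => PySem.Set.add s (e'.1 + d.1, e'.2 + d.2)) s)
            PySem.Set.empty)
          e := by
  rw [Bool.eq_iff_iff]
  simp only [List.any_eq_true, PySem.Set.contains_iff, PySem.Set.mem_ofList, mem_nbfold]
  constructor
  · rintro ⟨d, hd, hmem⟩
    refine Or.inr ⟨(e.1 + d.1, e.2 + d.2), hmem, (-d.1, -d.2), neg_mem_offsets hd, ?_⟩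
    obtain ⟨e1, e2⟩ := e
    simp
  · rintro (h | ⟨e', he', d, hd, hpe⟩)
    · simp [PySem.Set.empty] at h
    · refine ⟨(-d.1, -d.2), neg_mem_offsets hd, ?_⟩
      obtain ⟨e1, e2⟩ := e'
      obtain ⟨p1, p2⟩ := e
      simp at hpe
      obtain ⟨h1, h2⟩ := hpe
      have : (p1 + -d.1, p2 + -d.2) = (e1, e2) := by
        subst h1; subst h2; simp
      rw [this]; exact he'

-- ===== VERDICT (by name: the statement is the Claim_ definition above) =====
theorem get_moveable_elves_spec : Claim_equal_get_moveable_elves := by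
  intro elves _
  unfold Spec_get_moveable_elves get_moveable_elves get_moveable_elves_alt
  have h0 : (PySem.List.enumerate elves : List (Int × (Int × Int)))
      = PySem.List.enumerate elves (((([] : List Bool).length : Nat)) : Int) := by rfl
  rw [h0]
  have := outerA_fold (PySem.Set.ofList elves) elves ([] : List Bool)
  simp only [List.nil_append] at this
  rw [this]
  exact List.map_congr_left (fun e _ => cond_eq elves e)
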